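-- pv_equiv track=rewrite | github.com/delimatsuo/lifestylevideos-short-factory | shorts_factory/src/security/secure_path_validator.py | _is_absolute_path_safe
-- ===== SOURCE A (Python) =====
-- def _is_absolute_path_safe(path_str: str) -> bool:
--     """Check if an absolute path is safe (not pointing to system directories)"""
--     dangerous_absolute_paths = [
--         '/etc/', '/bin/', '/sbin/', '/usr/bin/', '/usr/sbin/',
--         '/root/', '/home/', '/var/log/', '/sys/', '/proc/',
--         '/dev/', '/boot/', '/lib/', '/lib64/', '/opt/',
--         'C:\\Windows\\', 'C:\\Program Files\\', 'C:\\Users\\',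
--         'C:\\System32\\', '/System/', '/Library/', '/Applications/'
--     ]
--
--     path_lower = path_str.lower()
--     return not any(dangerous_prefix in path_lower for dangerous_prefix in dangerous_absolute_paths)
-- ===== SOURCE B (Python) =====
-- _DANGEROUS = [
--     '/etc/', '/bin/', '/sbin/', '/usr/bin/', '/usr/sbin/',
--     '/root/', '/home/', '/var/log/', '/sys/', '/proc/',
--     '/dev/', '/boot/', '/lib/', '/lib64/', '/opt/',
--     'C:\\Windows\\', 'C:\\Program Files\\', 'C:\\Users\\',
--     'C:\\System32\\', '/System/', '/Library/', '/Applications/'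
-- ]
--
-- # First-character index, built once: maps the first character of each dangerous
-- # prefix to the list of its tails.  The scan then only tests, at each position,
-- # the tails bucketed under the current character.
-- _INDEX = {}
-- for _p in _DANGEROUS:
--     _INDEX.setdefault(_p[0], []).append(_p[1:])
--
--
-- def _is_absolute_path_safe(path_str: str) -> bool:
--     s = path_str.lower()
--     for i, c in enumerate(s):
--         for tail in _INDEX.get(c, []):
--             if s.startswith(tail, i + 1):
--                 return False
--     return True
-- ===== Notes on version B (the rewrite author's own statement) =====
-- stated objective: alternative
-- what changed: B precomputes a first-character index (dict mapping the first character of each dangerous prefix to its tails) once, then walks the lowered path a single time, at each position looking up the current character and testing only the bucketed tails against the rest of the string, instead of A's 22 independent whole-string substring-membership searches.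
import Mathlib
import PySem

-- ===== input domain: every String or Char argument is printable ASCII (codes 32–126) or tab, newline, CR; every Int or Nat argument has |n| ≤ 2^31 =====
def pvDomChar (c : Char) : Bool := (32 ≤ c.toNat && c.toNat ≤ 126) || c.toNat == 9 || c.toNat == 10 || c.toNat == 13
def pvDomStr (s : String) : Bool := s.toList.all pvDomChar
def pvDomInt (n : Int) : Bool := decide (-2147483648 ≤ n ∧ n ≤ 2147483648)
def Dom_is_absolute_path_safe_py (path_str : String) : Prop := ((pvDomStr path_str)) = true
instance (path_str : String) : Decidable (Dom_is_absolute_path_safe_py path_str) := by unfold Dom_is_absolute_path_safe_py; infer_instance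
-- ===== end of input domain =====

-- B builds a one-time first-character index (dict: first char -> tails) and scans the
-- lowered path once, testing only the bucketed tails at each position, instead of A's
-- 22 independent substring-membership searches; objective: alternative (same cost class).


-- ===== PORT A =====
def dangerousAbsolutePathsA : List String :=
  ["/etc/", "/bin/", "/sbin/", "/usr/bin/", "/usr/sbin/",
   "/root/", "/home/", "/var/log/", "/sys/", "/proc/",
   "/dev/", "/boot/", "/lib/", "/lib64/", "/opt/",
   "C:\\Windows\\", "C:\\Program Files\\", "C:\\Users\\",
   "C:\\System32\\", "/System/", "/Library/", "/Applications/"]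

def is_absolute_path_safe_py (path_str : String) : Bool :=
  let path_lower := PySem.Str.lower path_str
  ! dangerousAbsolutePathsA.any (fun dangerous_prefix => PySem.Str.isIn dangerous_prefix path_lower)

-- ===== PORT B =====
def dangerousB : List String :=
  ["/etc/", "/bin/", "/sbin/", "/usr/bin/", "/usr/sbin/",
   "/root/", "/home/", "/var/log/", "/sys/", "/proc/",
   "/dev/", "/boot/", "/lib/", "/lib64/", "/opt/",
   "C:\\Windows\\", "C:\\Program Files\\", "C:\\Users\\",
   "C:\\System32\\", "/System/", "/Library/", "/Applications/"]

-- _INDEX = {}; for p in _DANGEROUS: _INDEX.setdefault(p[0], []).append(p[1:])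
-- (setdefault + in-place append = insert of the extended bucket; all prefixes nonempty)
def indexB : PySem.Dict Char (List (List Char)) :=
  dangerousB.foldl
    (fun d p =>
      match p.toList with
      | [] => d
      | c :: t => PySem.Dict.insert d c (PySem.Dict.getD d c [] ++ [t]))
    PySem.Dict.empty

-- for i, c in enumerate(s): for tail in _INDEX.get(c, []): if s.startswith(tail, i+1): return False
def scanB (d : PySem.Dict Char (List (List Char))) : List Char → Bool
  | [] => true
  | c :: rest =>
    if (PySem.Dict.getD d c []).any (fun tail => PySem.Chars.startswith rest tail) then false
    else scanB d rest

def is_absolute_path_safe_py_alt (path_str : String) : Bool :=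
  scanB indexB (PySem.Str.lower path_str).toList

-- ===== PRECONDITION & SPEC =====
def Spec_is_absolute_path_safe_py (path_str : String) (out : Bool) : Prop := out = is_absolute_path_safe_py_alt path_str
instance (path_str : String) (out : Bool) : Decidable (Spec_is_absolute_path_safe_py path_str out) := by unfold Spec_is_absolute_path_safe_py; infer_instance

-- ===== CLAIM (what is proved, stated in full; the proofs are below) =====
def Claim_equal_is_absolute_path_safe_py : Prop := ∀ (path_str : String), Dom_is_absolute_path_safe_py path_str → Spec_is_absolute_path_safe_py path_str (is_absolute_path_safe_py path_str)

-- ===== LEMMAS AND PROOFS =====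

-- the built index, evaluated once
set_option maxRecDepth 8192 in
lemma indexB_eval :
    indexB = PySem.Dict.mk [('/', ["etc/", "bin/", "sbin/", "usr/bin/", "usr/sbin/", "root/", "home/",
                     "var/log/", "sys/", "proc/", "dev/", "boot/", "lib/", "lib64/", "opt/",
                     "System/", "Library/", "Applications/"].map String.toList),
              ('C', [":\\Windows\\", ":\\Program Files\\", ":\\Users\\", ":\\System32\\"].map String.toList)] := by
  decide

-- bucket lookup at a position computes "some full prefix starts here"
lemma indexB_bucket (c : Char) (rest : List Char) :
    (PySem.Dict.getD indexB c []).any (fun tail => PySem.Chars.startswith rest tail)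
      = dangerousB.any (fun p => PySem.Chars.startswith (c :: rest) p.toList) := by
  rw [indexB_eval]
  by_cases h1 : c = '/'
  · subst h1; simp [PySem.Dict.getD, PySem.Dict.get?, dangerousB,
      PySem.Chars.startswith, List.isPrefixOf]
  · by_cases h2 : c = 'C'
    · subst h2; simp [PySem.Dict.getD, PySem.Dict.get?, dangerousB,
        PySem.Chars.startswith, List.isPrefixOf]
    · simp [PySem.Dict.getD, PySem.Dict.get?, dangerousB,
        PySem.Chars.startswith, List.isPrefixOf, Ne.symm h1, Ne.symm h2]

-- the position-major scan over the index computes "no dangerous prefix occurs as an infix"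
lemma scanB_eq (cs : List Char) :
    scanB indexB cs = ! dangerousB.any (fun p => PySem.Chars.isIn p.toList cs) := by
  induction cs with
  | nil =>
    have hnone : (dangerousB.any fun p => PySem.Chars.isIn p.toList []) = false := by
      rw [List.any_eq_false]
      intro p hp
      have hne : p.toList ≠ [] := by fin_cases hp <;> decide
      simp [PySem.Chars.isIn_iff_infix, hne]
    simp [scanB, hnone]
  | cons c rest ih =>
    simp only [scanB, indexB_bucket]
    split_ifs with hstart
    · simp only [eq_comm (a := false), Bool.not_eq_false', List.any_eq_true] at *
      obtain ⟨p, hp, hsw⟩ := hstart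
      refine ⟨p, hp, ?_⟩
      rw [PySem.Chars.isIn_iff_infix]
      exact (PySem.Chars.startswith_iff _ _ |>.mp hsw).isInfix
    · have hcong : (dangerousB.any fun p => PySem.Chars.isIn p.toList (c :: rest))
          = dangerousB.any fun p => PySem.Chars.isIn p.toList rest := by
        apply Bool.eq_iff_iff.mpr
        simp only [List.any_eq_true]
        constructor
        · rintro ⟨p, hp, hi⟩
          refine ⟨p, hp, ?_⟩
          rw [PySem.Chars.isIn_iff_infix] at hi ⊢
          rcases List.infix_cons_iff.mp hi with hpre | hinf
          · exact absurd (List.any_eq_true.mpr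
              ⟨p, hp, (PySem.Chars.startswith_iff _ _).mpr hpre⟩) hstart
          · exact hinf
        · rintro ⟨p, hp, hi⟩
          refine ⟨p, hp, ?_⟩
          rw [PySem.Chars.isIn_iff_infix] at hi ⊢
          exact List.infix_cons_iff.mpr (Or.inr hi)
      rw [ih, hcong]

-- ===== VERDICT (by name: the statement is the Claim_ definition above) =====
theorem is_absolute_path_safe_py_spec : Claim_equal_is_absolute_path_safe_py := by
  intro path_str _
  unfold Spec_is_absolute_path_safe_py is_absolute_path_safe_py is_absolute_path_safe_py_alt
  rw [scanB_eq]
  simp only [PySem.Str.isIn_eq]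
  rfl
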